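-- pv_equiv track=rewrite | github.com/Athan-Johnson/Coding-Projects | Highlights!/Algorithms/DP_algorithms.py | subseq_in_str
-- ===== SOURCE A (Python) =====
-- def subseq_in_str(string, sub_str):
--     matches = [[0] * (len(string) + 1) for _ in range(len(sub_str) + 1)]
--     for _ in range(len(string) + 1):
--         matches[0][_] = 1
--
--     for i in range(1, len(sub_str) + 1):
--         for j in range(1, len(string) + 1):
--             if string[j - 1] == sub_str[i - 1]:
--                 matches[i][j] = matches[i][j - 1] + matches[i - 1][j - 1]
--             else:
--                 matches[i][j] = matches[i][j - 1]
--
--     return matches[len(sub_str)][len(string)]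
-- ===== SOURCE B (Python) =====
-- def subseq_in_str(string, sub_str):
--     n, m = len(string), len(sub_str)
--     memo = {}
--
--     def value(i, j):
--         # resolved count of sub_str[i:] inside string[j:], or None if not yet known
--         if i == m:
--             return 1
--         if j == n:
--             return 0
--         return memo.get((i, j))
--
--     stack = [(0, 0)]
--     while stack:
--         i, j = stack[-1]
--         if value(i, j) is not None:
--             stack.pop()
--             continue
--         a = value(i, j + 1)
--         if a is None:
--             stack.append((i, j + 1))
--             continue
--         if string[j] == sub_str[i]:
--             b = value(i + 1, j + 1)
--             if b is None:
--                 stack.append((i + 1, j + 1))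
--                 continue
--         else:
--             b = 0
--         memo[(i, j)] = a + b
--         stack.pop()
--     return value(0, 0)
-- ===== Notes on version B (the rewrite author's own statement) =====
-- stated objective: alternative
-- what changed: A fills the whole (m+1)x(n+1) table bottom-up; B evaluates the recurrence top-down from the goal cell with an explicit work stack and a memo dict, computing only the cells the answer actually depends on.
import Mathlib
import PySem

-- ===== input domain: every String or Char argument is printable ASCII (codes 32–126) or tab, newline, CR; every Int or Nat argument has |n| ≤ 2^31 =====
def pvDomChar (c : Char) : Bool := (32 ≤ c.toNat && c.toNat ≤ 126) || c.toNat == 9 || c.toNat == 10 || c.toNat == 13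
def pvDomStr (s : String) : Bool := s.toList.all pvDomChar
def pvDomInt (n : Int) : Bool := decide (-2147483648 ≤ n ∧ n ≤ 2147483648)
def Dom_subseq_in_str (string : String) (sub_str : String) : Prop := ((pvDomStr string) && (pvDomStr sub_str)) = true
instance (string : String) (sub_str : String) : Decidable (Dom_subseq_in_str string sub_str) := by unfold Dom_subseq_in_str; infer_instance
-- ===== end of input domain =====

-- A fills the whole (m+1)×(n+1) table bottom-up; B evaluates the same recurrence top-down
-- from the goal cell with an explicit work stack and a memo dict, computing only the cells
-- the answer depends on. Objective: alternative.

-- ===== PORT A =====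
-- A's inner loop over j = 1..n: builds row i left-to-right; `cur` is matches[i][j-1],
-- each pair (cj, pv) is (string[j-1], matches[i-1][j-1]).
def rowA (tc : Char) : Int → List (Char × Int) → List Int
  | cur, [] => [cur]
  | cur, (cj, pv) :: rest => cur :: rowA tc (if cj == tc then cur + pv else cur) rest

def subseq_in_str (string : String) (sub_str : String) : Int :=
  let s := string.toList
  let t := sub_str.toList
  -- matches[0][_] = 1 for all _; then row i computed from row i-1 for i = 1..m
  let lastRow := t.foldl (fun prev tc => rowA tc 0 (s.zip prev)) (List.replicate (s.length + 1) 1)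
  lastRow.getD s.length 0     -- matches[len(sub_str)][len(string)]

-- ===== PORT B =====
-- B's `value(i, j)`: the resolved count of sub_str[i:] inside string[j:], none if not yet known.
def valB (m n : Nat) (memo : PySem.Dict (Nat × Nat) Int) (i j : Nat) : Option Int :=
  if i = m then some 1
  else if j = n then some 0
  else memo.get? (i, j)

-- B's `while stack:` loop, fuel-guarded for totality (the fuel is a guard only; the
-- verdict proof shows the fuel supplied by subseq_in_str_alt always suffices).
def loopB (s t : List Char) : Nat → List (Nat × Nat) → PySem.Dict (Nat × Nat) Int →
    Option (PySem.Dict (Nat × Nat) Int)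
  | _, [], memo => some memo
  | 0, _ :: _, _ => none
  | fuel + 1, (i, j) :: rest, memo =>
    match valB t.length s.length memo i j with
    | some _ => loopB s t fuel rest memo
    | none =>
      match valB t.length s.length memo i (j + 1) with
      | none => loopB s t fuel ((i, j + 1) :: (i, j) :: rest) memo
      | some a =>
        if s.getD j ' ' == t.getD i ' ' then
          match valB t.length s.length memo (i + 1) (j + 1) with
          | none => loopB s t fuel ((i + 1, j + 1) :: (i, j) :: rest) memo
          | some b => loopB s t fuel rest (memo.insert (i, j) (a + b))
        else loopB s t fuel rest (memo.insert (i, j) (a + 0))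

def subseq_in_str_alt (string : String) (sub_str : String) : Int :=
  let s := string.toList
  let t := sub_str.toList
  match loopB s t (4 ^ (s.length + 1)) [(0, 0)] PySem.Dict.empty with
  | some memo => (valB t.length s.length memo 0 0).getD 0
  | none => 0

-- ===== PRECONDITION & SPEC =====
def Spec_subseq_in_str (string : String) (sub_str : String) (out : Int) : Prop := out = subseq_in_str_alt string sub_str
instance (string : String) (sub_str : String) (out : Int) : Decidable (Spec_subseq_in_str string sub_str out) := by unfold Spec_subseq_in_str; infer_instance

-- ===== CLAIM (what is proved, stated in full; the proofs are below) =====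
def Claim_equal_subseq_in_str : Prop := ∀ (string : String) (sub_str : String), Dom_subseq_in_str string sub_str → Spec_subseq_in_str string sub_str (subseq_in_str string sub_str)

-- ===== LEMMAS AND PROOFS =====

-- the common semantics: numSub s t = number of subsequences of s equal to t
def numSub : List Char → List Char → Int
  | _, [] => 1
  | [], _ :: _ => 0
  | c :: s', d :: t' => numSub s' (d :: t') + (if c == d then numSub s' t' else 0)

-- A's DP grid: Fgrid s t i j = number of subsequences of s[:j] equal to t[:i]
def Fgrid (s t : List Char) : Nat → Nat → Int
  | 0, _ => 1
  | _ + 1, 0 => 0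
  | i + 1, j + 1 =>
      if s.getD j ' ' == t.getD i ' ' then Fgrid s t (i + 1) j + Fgrid s t i j
      else Fgrid s t (i + 1) j
  termination_by i j => (i, j)

-- B's pure recurrence: gB s t i j = number of subsequences of s[j:] equal to t[i:]
def gB (s t : List Char) (i j : Nat) : Int :=
  if i = t.length then 1
  else if s.length ≤ j then 0
  else gB s t i (j + 1) + (if s.getD j ' ' == t.getD i ' ' then gB s t (i + 1) (j + 1) else 0)
  termination_by s.length - j

theorem getD_of_drop_cons {α : Type} [Inhabited α] (l sfx : List α) (c : α) (n : Nat)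
    (h : l.drop n = c :: sfx) (d : α) : l.getD n d = c := by
  have h1 : l[n]? = some c := by
    rw [← List.head?_drop, h]; rfl
  simp [List.getD_eq_getElem?_getD, h1]

theorem drop_succ_of_drop_cons {α : Type} (l sfx : List α) (c : α) (n : Nat)
    (h : l.drop n = c :: sfx) : l.drop (n + 1) = sfx := by
  have : l.drop (n + 1) = (l.drop n).drop 1 := by rw [List.drop_drop]
  rw [this, h]; rfl

theorem rowA_length (tc : Char) : ∀ (pairs : List (Char × Int)) (cur : Int),
    (rowA tc cur pairs).length = pairs.length + 1 := by
  intro pairs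
  induction pairs with
  | nil => intro cur; rfl
  | cons p rest ih => intro cur; cases p; simp [rowA, ih]

theorem rowA_spec (s t : List Char) (i : Nat) :
    ∀ (sfx : List Char) (j0 : Nat) (cur : Int) (prev : List Int),
      sfx = s.drop j0 → sfx.length ≤ prev.length →
      cur = Fgrid s t (i + 1) j0 →
      (∀ k, k < sfx.length → prev.getD k 0 = Fgrid s t i (j0 + k)) →
      ∀ k, k ≤ sfx.length →
        (rowA (t.getD i ' ') cur (sfx.zip prev)).getD k 0 = Fgrid s t (i + 1) (j0 + k) := by
  intro sfx
  induction sfx with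
  | nil =>
    intro j0 cur prev _ _ hcur _ k hk
    have hk0 : k = 0 := Nat.le_zero.mp (by simpa using hk)
    subst hk0
    simpa [rowA] using hcur
  | cons c sfx' ih =>
    intro j0 cur prev hdrop hlen hcur hprev k hk
    obtain ⟨p, prev', rfl⟩ : ∃ p prev', prev = p :: prev' := by
      cases prev with
      | nil => simp at hlen
      | cons a b => exact ⟨a, b, rfl⟩
    have hc : s.getD j0 ' ' = c := getD_of_drop_cons s sfx' c j0 hdrop.symm ' '
    have hp : p = Fgrid s t i j0 := by
      have := hprev 0 (by simp)
      simpa using this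
    cases k with
    | zero => simpa [rowA] using hcur
    | succ k' =>
      have hnext : (if c == t.getD i ' ' then cur + p else cur) = Fgrid s t (i + 1) (j0 + 1) := by
        rw [show Fgrid s t (i + 1) (j0 + 1) =
            if s.getD j0 ' ' == t.getD i ' ' then Fgrid s t (i + 1) j0 + Fgrid s t i j0
            else Fgrid s t (i + 1) j0 from by rw [Fgrid]]
        rw [hc, hcur, hp]
      have := ih (j0 + 1) _ prev'
        (drop_succ_of_drop_cons s sfx' c j0 hdrop.symm).symm
        (by simpa using hlen) hnext
        (by
          intro k hk
          have := hprev (k + 1) (by simpa using hk)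
          simpa [Nat.add_assoc, Nat.add_comm 1 k] using this)
        k' (by simpa using hk)
      simpa [rowA, Nat.add_assoc, Nat.add_comm 1 k'] using this

theorem foldA_spec (s t : List Char) :
    ∀ (tsfx : List Char) (i0 : Nat) (prev : List Int),
      tsfx = t.drop i0 → prev.length = s.length + 1 →
      (∀ k, k ≤ s.length → prev.getD k 0 = Fgrid s t i0 k) →
      (tsfx.foldl (fun prev tc => rowA tc 0 (s.zip prev)) prev).getD s.length 0
        = Fgrid s t (i0 + tsfx.length) s.length := by
  intro tsfx
  induction tsfx with
  | nil =>
    intro i0 prev _ _ hprev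
    simpa using hprev s.length (le_refl _)
  | cons tc tsfx' ih =>
    intro i0 prev hdrop hlen hprev
    have hc : t.getD i0 ' ' = tc := getD_of_drop_cons t tsfx' tc i0 hdrop.symm ' '
    have hz : (s.zip prev).length = s.length := by simp [hlen]
    have hrow := rowA_spec s t i0 s 0 0 prev rfl (by omega)
      (by rw [Fgrid]) (fun k hk => by simpa using hprev k (le_of_lt hk))
    have ih' := ih (i0 + 1) (rowA tc 0 (s.zip prev))
      (drop_succ_of_drop_cons t tsfx' tc i0 hdrop.symm).symm
      (by rw [rowA_length, hz])
      (by
        intro k hk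
        have := hrow k (by simpa using hk)
        rw [hc] at this
        simpa using this)
    simp only [List.foldl_cons]
    rw [ih']
    congr 1
    simp only [List.length_cons]
    omega

-- numSub of anything against the empty pattern is 1
theorem numSub_nil_right (s : List Char) : numSub s [] = 1 := by
  cases s <;> rfl

-- tail-append recurrence for numSub (the one A's grid steps by)
theorem numSub_append_singleton (c d : Char) :
    ∀ (s0 t0 : List Char),
      numSub (s0 ++ [c]) (t0 ++ [d]) =
        numSub s0 (t0 ++ [d]) + (if c == d then numSub s0 t0 else 0) := by
  intro s0
  induction s0 with
  | nil =>
    intro t0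
    cases t0 with
    | nil => simp [numSub]
    | cons e t0' =>
      cases t0' with
      | nil => simp [numSub]
      | cons f t0'' => simp [numSub]
  | cons a s0' ih =>
    intro t0
    cases t0 with
    | nil =>
      have h1 := ih ([] : List Char)
      simp only [List.nil_append] at h1
      simp only [List.nil_append, List.cons_append, numSub, h1, numSub_nil_right]
      split_ifs <;> ring
    | cons e t0' =>
      have h1 := ih (e :: t0')
      have h2 := ih t0'
      simp only [List.cons_append] at h1
      simp only [List.cons_append, numSub, h1, h2]
      split_ifs <;> ring

-- A's grid computes numSub of the prefixes
theorem Fgrid_eq_numSub (s t : List Char) :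
    ∀ (j : Nat), j ≤ s.length → ∀ (i : Nat), i ≤ t.length →
      Fgrid s t i j = numSub (s.take j) (t.take i) := by
  intro j
  induction j with
  | zero =>
    intro _ i hi
    cases i with
    | zero => rw [Fgrid]; rfl
    | succ i' =>
      rw [Fgrid]
      obtain ⟨e, t', rfl⟩ : ∃ e t', t = e :: t' := by
        cases t with
        | nil => simp at hi
        | cons a b => exact ⟨a, b, rfl⟩
      simp [numSub]
  | succ j' ih =>
    intro hj i hi
    cases i with
    | zero => rw [Fgrid, List.take_zero, numSub_nil_right]
    | succ i' =>
      have hj' : j' < s.length := by omega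
      have hi' : i' < t.length := by omega
      have hts : s.take (j' + 1) = s.take j' ++ [s.getD j' ' '] := by
        rw [List.take_add_one]
        congr 1
        rw [List.getElem?_eq_getElem hj']
        simp [List.getD_eq_getElem?_getD, List.getElem?_eq_getElem hj']
      have htt : t.take (i' + 1) = t.take i' ++ [t.getD i' ' '] := by
        rw [List.take_add_one]
        congr 1
        rw [List.getElem?_eq_getElem hi']
        simp [List.getD_eq_getElem?_getD, List.getElem?_eq_getElem hi']
      rw [show Fgrid s t (i' + 1) (j' + 1) =
          if s.getD j' ' ' == t.getD i' ' ' then Fgrid s t (i' + 1) j' + Fgrid s t i' j'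
          else Fgrid s t (i' + 1) j' from by rw [Fgrid]]
      rw [hts, htt, numSub_append_singleton,
        ih (by omega) (i' + 1) hi, ih (by omega) i' (by omega), ← htt]
      split_ifs <;> ring

-- B's recurrence computes numSub of the suffixes
theorem gB_eq_numSub (s t : List Char) :
    ∀ (k j : Nat), s.length - j ≤ k → j ≤ s.length → ∀ (i : Nat), i ≤ t.length →
      gB s t i j = numSub (s.drop j) (t.drop i) := by
  intro k
  induction k with
  | zero =>
    intro j hk hj i hi
    have hjn : j = s.length := by omega
    subst hjn
    rw [gB]
    simp only [List.drop_length]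
    by_cases h : i = t.length
    · simp [h, numSub_nil_right]
    · have hi' : i < t.length := by omega
      obtain ⟨e, t', ht⟩ : ∃ e t', t.drop i = e :: t' := by
        cases hd : t.drop i with
        | nil => have := List.drop_eq_nil_iff.mp hd; omega
        | cons a b => exact ⟨a, b, rfl⟩
      simp [h, ht, numSub]
  | succ k' ih =>
    intro j hk hj i hi
    rw [gB]
    by_cases h : i = t.length
    · simp [h, numSub_nil_right]
    · have hi' : i < t.length := by omega
      by_cases hjn : s.length ≤ j
      · have : j = s.length := by omega
        subst this
        simp only [le_refl, if_true, h, if_false]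
        obtain ⟨e, t', ht⟩ : ∃ e t', t.drop i = e :: t' := by
          cases hd : t.drop i with
          | nil => have := List.drop_eq_nil_iff.mp hd; omega
          | cons a b => exact ⟨a, b, rfl⟩
        simp [ht, numSub]
      · have hjlt : j < s.length := by omega
        have hds : s.drop j = s.getD j ' ' :: s.drop (j + 1) := by
          rw [List.drop_eq_getElem_cons hjlt]
          congr 1
          simp [List.getD_eq_getElem?_getD, List.getElem?_eq_getElem hjlt]
        have hdt : t.drop i = t.getD i ' ' :: t.drop (i + 1) := by
          rw [List.drop_eq_getElem_cons hi']
          congr 1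
          simp [List.getD_eq_getElem?_getD, List.getElem?_eq_getElem hi']
        rw [ih (j + 1) (by omega) (by omega) i hi,
          ih (j + 1) (by omega) (by omega) (i + 1) (by omega)] at *
        simp only [h, if_false, hjn, if_false]
        rw [hds, hdt, numSub, ← hdt]

-- validity of the memo: every stored value is the recurrence's value
def ValidB (s t : List Char) (memo : PySem.Dict (Nat × Nat) Int) : Prop :=
  ∀ i j v, memo.get? (i, j) = some v → v = gB s t i j

theorem valB_sound (s t : List Char) (memo : PySem.Dict (Nat × Nat) Int)
    (hv : ValidB s t memo) (i j : Nat) (_hj : j ≤ s.length) (v : Int)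
    (h : valB t.length s.length memo i j = some v) : v = gB s t i j := by
  unfold valB at h
  split_ifs at h with h1 h2
  · have hv1 : v = 1 := by simpa using h.symm
    subst hv1; rw [gB]; simp [h1]
  · have hv0 : v = 0 := by simpa using h.symm
    subst hv0; rw [gB]; simp [h1, h2]
  · exact hv i j v h

theorem valB_mono (s t : List Char) (memo memo' : PySem.Dict (Nat × Nat) Int)
    (hsub : ∀ p v, memo.get? p = some v → memo'.get? p = some v) (i j : Nat) (v : Int)
    (h : valB t.length s.length memo i j = some v) : valB t.length s.length memo' i j = some v := by
  unfold valB at h ⊢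
  split_ifs at h ⊢ <;> first | exact h | exact hsub _ _ h

-- one unfolding of the while loop in each of its five shapes
theorem loopB_pop (s t : List Char) (memo : PySem.Dict (Nat × Nat) Int) (i j : Nat) (v : Int)
    (h : valB t.length s.length memo i j = some v) (g' : Nat) (rest : List (Nat × Nat)) :
    loopB s t (g' + 1) ((i, j) :: rest) memo = loopB s t g' rest memo := by
  simp [loopB, h]

theorem loopB_push1 (s t : List Char) (memo : PySem.Dict (Nat × Nat) Int) (i j : Nat)
    (h0 : valB t.length s.length memo i j = none)
    (hA : valB t.length s.length memo i (j + 1) = none) (g' : Nat) (rest : List (Nat × Nat)) :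
    loopB s t (g' + 1) ((i, j) :: rest) memo
      = loopB s t g' ((i, j + 1) :: (i, j) :: rest) memo := by
  simp [loopB, h0, hA]

theorem loopB_push2 (s t : List Char) (memo : PySem.Dict (Nat × Nat) Int) (i j : Nat) (a : Int)
    (h0 : valB t.length s.length memo i j = none)
    (hA : valB t.length s.length memo i (j + 1) = some a)
    (hc : (s.getD j ' ' == t.getD i ' ') = true)
    (hB : valB t.length s.length memo (i + 1) (j + 1) = none) (g' : Nat) (rest : List (Nat × Nat)) :
    loopB s t (g' + 1) ((i, j) :: rest) memo
      = loopB s t g' ((i + 1, j + 1) :: (i, j) :: rest) memo := by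
  simp [loopB, h0, hA, hB]
  intro hne
  exact absurd (by simpa using hc) hne

theorem loopB_memo_t (s t : List Char) (memo : PySem.Dict (Nat × Nat) Int) (i j : Nat) (a b : Int)
    (h0 : valB t.length s.length memo i j = none)
    (hA : valB t.length s.length memo i (j + 1) = some a)
    (hc : (s.getD j ' ' == t.getD i ' ') = true)
    (hB : valB t.length s.length memo (i + 1) (j + 1) = some b) (g' : Nat) (rest : List (Nat × Nat)) :
    loopB s t (g' + 1) ((i, j) :: rest) memo
      = loopB s t g' rest (memo.insert (i, j) (a + b)) := by
  simp [loopB, h0, hA, hB]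
  intro hne
  exact absurd (by simpa using hc) hne

theorem loopB_memo_f (s t : List Char) (memo : PySem.Dict (Nat × Nat) Int) (i j : Nat) (a : Int)
    (h0 : valB t.length s.length memo i j = none)
    (hA : valB t.length s.length memo i (j + 1) = some a)
    (hc : (s.getD j ' ' == t.getD i ' ') = false) (g' : Nat) (rest : List (Nat × Nat)) :
    loopB s t (g' + 1) ((i, j) :: rest) memo
      = loopB s t g' rest (memo.insert (i, j) (a + 0)) := by
  simp [loopB, h0, hA]
  intro heq
  exact absurd heq (by simpa using hc)

theorem valB_none_elim (s t : List Char) (memo : PySem.Dict (Nat × Nat) Int) (i j : Nat)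
    (h : valB t.length s.length memo i j = none) :
    i ≠ t.length ∧ j ≠ s.length ∧ memo.get? (i, j) = none := by
  unfold valB at h
  split_ifs at h with h1 h2
  exact ⟨h1, h2, h⟩

theorem sub_insert (memo : PySem.Dict (Nat × Nat) Int) (i j : Nat) (w : Int)
    (hnone : memo.get? (i, j) = none) :
    ∀ p v, memo.get? p = some v → (memo.insert (i, j) w).get? p = some v := by
  intro p v h
  rw [PySem.Dict.get?_insert]
  split_ifs with he
  · rw [he, hnone] at h; cases h
  · exact h

theorem valid_insert (s t : List Char) (memo : PySem.Dict (Nat × Nat) Int) (i j : Nat) (w : Int)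
    (hv : ValidB s t memo) (hw : w = gB s t i j) : ValidB s t (memo.insert (i, j) w) := by
  intro i' j' v h
  rw [PySem.Dict.get?_insert] at h
  split_ifs at h with he
  · obtain ⟨rfl, rfl⟩ : i' = i ∧ j' = j := by
      exact ⟨congrArg Prod.fst he, congrArg Prod.snd he⟩
    have : w = v := by simpa using h
    rw [← this, hw]
  · exact hv i' j' v h

theorem valB_get_insert_self (s t : List Char) (memo : PySem.Dict (Nat × Nat) Int) (i j : Nat)
    (w : Int) (h1 : i ≠ t.length) (h2 : j ≠ s.length) :
    valB t.length s.length (memo.insert (i, j) w) i j = some w := by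
  unfold valB
  rw [if_neg h1, if_neg h2, PySem.Dict.get?_insert_self]

-- finishing move: both children known, the cell gets memoized (matching-character case)
theorem finishB_t (s t : List Char) (memo : PySem.Dict (Nat × Nat) Int) (i j : Nat)
    (hv : ValidB s t memo) (h1 : i ≠ t.length) (hjlt : j < s.length)
    (h0 : valB t.length s.length memo i j = none)
    (hA : valB t.length s.length memo i (j + 1) = some (gB s t i (j + 1)))
    (hc : (s.getD j ' ' == t.getD i ' ') = true)
    (hB : valB t.length s.length memo (i + 1) (j + 1) = some (gB s t (i + 1) (j + 1))) :
    ∃ memo', ValidB s t memo' ∧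
      (∀ p v, memo.get? p = some v → memo'.get? p = some v) ∧
      valB t.length s.length memo' i j = some (gB s t i j) ∧
      ∀ (g' : Nat) (rest : List (Nat × Nat)),
        loopB s t (g' + 1) ((i, j) :: rest) memo = loopB s t g' rest memo' := by
  obtain ⟨_, h2, hget⟩ := valB_none_elim s t memo i j h0
  have hgw : gB s t i (j + 1) + gB s t (i + 1) (j + 1) = gB s t i j := by
    conv_rhs => rw [gB]
    rw [if_neg h1, if_neg (not_le.mpr hjlt), if_pos hc]
  refine ⟨memo.insert (i, j) (gB s t i (j + 1) + gB s t (i + 1) (j + 1)),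
    valid_insert s t memo i j _ hv hgw, sub_insert memo i j _ hget, ?_, ?_⟩
  · rw [valB_get_insert_self s t memo i j _ h1 h2, hgw]
  · intro g' rest
    exact loopB_memo_t s t memo i j _ _ h0 hA hc hB g' rest

-- finishing move, non-matching-character case
theorem finishB_f (s t : List Char) (memo : PySem.Dict (Nat × Nat) Int) (i j : Nat)
    (hv : ValidB s t memo) (h1 : i ≠ t.length) (hjlt : j < s.length)
    (h0 : valB t.length s.length memo i j = none)
    (hA : valB t.length s.length memo i (j + 1) = some (gB s t i (j + 1)))
    (hc : (s.getD j ' ' == t.getD i ' ') = false) :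
    ∃ memo', ValidB s t memo' ∧
      (∀ p v, memo.get? p = some v → memo'.get? p = some v) ∧
      valB t.length s.length memo' i j = some (gB s t i j) ∧
      ∀ (g' : Nat) (rest : List (Nat × Nat)),
        loopB s t (g' + 1) ((i, j) :: rest) memo = loopB s t g' rest memo' := by
  obtain ⟨_, h2, hget⟩ := valB_none_elim s t memo i j h0
  have hgw : gB s t i (j + 1) + 0 = gB s t i j := by
    conv_rhs => rw [gB]
    rw [if_neg h1, if_neg (not_le.mpr hjlt), if_neg (by rw [hc]; simp)]
  refine ⟨memo.insert (i, j) (gB s t i (j + 1) + 0),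
    valid_insert s t memo i j _ hv hgw, sub_insert memo i j _ hget, ?_, ?_⟩
  · rw [valB_get_insert_self s t memo i j _ h1 h2, hgw]
  · intro g' rest
    exact loopB_memo_f s t memo i j _ h0 hA hc g' rest

-- the stack machine resolves any in-range cell given enough fuel, preserving the memo invariant
theorem resolveB (s t : List Char) :
    ∀ (k : Nat), ∀ (i j : Nat), s.length - j ≤ k → i ≤ t.length → j ≤ s.length →
      ∀ (memo : PySem.Dict (Nat × Nat) Int), ValidB s t memo →
      ∃ f, f ≤ 4 ^ (k + 1) ∧ ∃ memo', ValidB s t memo' ∧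
        (∀ p v, memo.get? p = some v → memo'.get? p = some v) ∧
        valB t.length s.length memo' i j = some (gB s t i j) ∧
        ∀ (g' : Nat) (rest : List (Nat × Nat)),
          loopB s t (f + g') ((i, j) :: rest) memo = loopB s t g' rest memo' := by
  intro k
  induction k with
  | zero =>
    intro i j hk hi hj memo hv
    have hjn : j = s.length := by omega
    have hval : valB t.length s.length memo i j = some (gB s t i j) := by
      unfold valB
      by_cases h1 : i = t.length
      · rw [if_pos h1, gB]; simp [h1]
      · rw [if_neg h1, if_pos hjn, gB]; simp [h1, hjn]
    exact ⟨1, Nat.one_le_pow _ _ (by norm_num), memo, hv, fun p v h => h, hval,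
      fun g' rest => by rw [Nat.add_comm, loopB_pop s t memo i j _ hval]⟩
  | succ k' ih =>
    intro i j hk hi hj memo hv
    have hP1 : 1 ≤ 4 ^ (k' + 1) := Nat.one_le_pow _ _ (by norm_num)
    have hPE : 4 ^ (k' + 1 + 1) = 4 ^ (k' + 1) * 4 := pow_succ 4 (k' + 1)
    cases hval : valB t.length s.length memo i j with
    | some v =>
      have hveq : v = gB s t i j := valB_sound s t memo hv i j hj v hval
      exact ⟨1, by omega, memo, hv, fun p v h => h, hveq ▸ hval,
        fun g' rest => by rw [Nat.add_comm, loopB_pop s t memo i j v hval]⟩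
    | none =>
      obtain ⟨h1, h2, hget⟩ := valB_none_elim s t memo i j hval
      have hjlt : j < s.length := by omega
      cases hA0 : valB t.length s.length memo i (j + 1) with
      | some a =>
        have ha : a = gB s t i (j + 1) :=
          valB_sound s t memo hv i (j + 1) (by omega) a hA0
        subst ha
        by_cases hc : (s.getD j ' ' == t.getD i ' ') = true
        · cases hB0 : valB t.length s.length memo (i + 1) (j + 1) with
          | some b =>
            have hb : b = gB s t (i + 1) (j + 1) :=
              valB_sound s t memo hv (i + 1) (j + 1) (by omega) b hB0
            subst hb
            obtain ⟨memo', hv', hsub', hres', hcont'⟩ :=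
              finishB_t s t memo i j hv h1 hjlt hval hA0 hc hB0
            refine ⟨1, by omega, memo', hv', hsub', hres', fun g' rest => ?_⟩
            rw [Nat.add_comm]
            exact hcont' g' rest
          | none =>
            obtain ⟨f₂, hf₂, memo₂, hv₂, hsub₂, hres₂, hcont₂⟩ :=
              ih (i + 1) (j + 1) (by omega) (by omega) (by omega) memo hv
            cases hval₂ : valB t.length s.length memo₂ i j with
            | some v =>
              have hveq : v = gB s t i j := valB_sound s t memo₂ hv₂ i j hj v hval₂
              refine ⟨1 + f₂ + 1, by omega, memo₂, hv₂, hsub₂, hveq ▸ hval₂, fun g' rest => ?_⟩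
              have e1 : 1 + f₂ + 1 + g' = (f₂ + (1 + g')) + 1 := by omega
              rw [e1, loopB_push2 s t memo i j _ hval hA0 hc hB0,
                hcont₂ (1 + g') ((i, j) :: rest)]
              have e2 : 1 + g' = g' + 1 := by omega
              rw [e2, loopB_pop s t memo₂ i j v hval₂]
            | none =>
              have hA₂ : valB t.length s.length memo₂ i (j + 1)
                  = some (gB s t i (j + 1)) :=
                valB_mono s t memo memo₂ hsub₂ i (j + 1) _ hA0
              obtain ⟨memo', hv', hsub', hres', hcont'⟩ :=
                finishB_t s t memo₂ i j hv₂ h1 hjlt hval₂ hA₂ hc hres₂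
              refine ⟨1 + f₂ + 1, by omega, memo', hv',
                (fun p v h => hsub' p v (hsub₂ p v h)), hres', fun g' rest => ?_⟩
              have e1 : 1 + f₂ + 1 + g' = (f₂ + (g' + 1)) + 1 := by omega
              rw [e1, loopB_push2 s t memo i j _ hval hA0 hc hB0,
                hcont₂ (g' + 1) ((i, j) :: rest), hcont' g' rest]
        · have hcf : (s.getD j ' ' == t.getD i ' ') = false := by simpa using hc
          obtain ⟨memo', hv', hsub', hres', hcont'⟩ :=
            finishB_f s t memo i j hv h1 hjlt hval hA0 hcf
          refine ⟨1, by omega, memo', hv', hsub', hres', fun g' rest => ?_⟩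
          rw [Nat.add_comm]
          exact hcont' g' rest
      | none =>
        obtain ⟨f₁, hf₁, memo₁, hv₁, hsub₁, hres₁, hcont₁⟩ :=
          ih i (j + 1) (by omega) hi (by omega) memo hv
        cases hval₁ : valB t.length s.length memo₁ i j with
        | some v =>
          have hveq : v = gB s t i j := valB_sound s t memo₁ hv₁ i j hj v hval₁
          refine ⟨1 + f₁ + 1, by omega, memo₁, hv₁, hsub₁, hveq ▸ hval₁, fun g' rest => ?_⟩
          have e1 : 1 + f₁ + 1 + g' = (f₁ + (1 + g')) + 1 := by omega
          rw [e1, loopB_push1 s t memo i j hval hA0, hcont₁ (1 + g') ((i, j) :: rest)]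
          have e2 : 1 + g' = g' + 1 := by omega
          rw [e2, loopB_pop s t memo₁ i j v hval₁]
        | none =>
          by_cases hc : (s.getD j ' ' == t.getD i ' ') = true
          · cases hB₁ : valB t.length s.length memo₁ (i + 1) (j + 1) with
            | some b =>
              have hb : b = gB s t (i + 1) (j + 1) :=
                valB_sound s t memo₁ hv₁ (i + 1) (j + 1) (by omega) b hB₁
              subst hb
              obtain ⟨memo', hv', hsub', hres', hcont'⟩ :=
                finishB_t s t memo₁ i j hv₁ h1 hjlt hval₁ hres₁ hc hB₁
              refine ⟨1 + f₁ + 1, by omega, memo', hv',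
                (fun p v h => hsub' p v (hsub₁ p v h)), hres', fun g' rest => ?_⟩
              have e1 : 1 + f₁ + 1 + g' = (f₁ + (g' + 1)) + 1 := by omega
              rw [e1, loopB_push1 s t memo i j hval hA0,
                hcont₁ (g' + 1) ((i, j) :: rest), hcont' g' rest]
            | none =>
              obtain ⟨f₂, hf₂, memo₂, hv₂, hsub₂, hres₂, hcont₂⟩ :=
                ih (i + 1) (j + 1) (by omega) (by omega) (by omega) memo₁ hv₁
              cases hval₂ : valB t.length s.length memo₂ i j with
              | some v =>
                have hveq : v = gB s t i j := valB_sound s t memo₂ hv₂ i j hj v hval₂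
                refine ⟨1 + f₁ + 1 + f₂ + 1, by omega, memo₂, hv₂,
                  (fun p v h => hsub₂ p v (hsub₁ p v h)), hveq ▸ hval₂, fun g' rest => ?_⟩
                have e1 : 1 + f₁ + 1 + f₂ + 1 + g' = (f₁ + ((f₂ + (1 + g')) + 1)) + 1 := by omega
                rw [e1, loopB_push1 s t memo i j hval hA0,
                  hcont₁ ((f₂ + (1 + g')) + 1) ((i, j) :: rest),
                  loopB_push2 s t memo₁ i j _ hval₁ hres₁ hc hB₁,
                  hcont₂ (1 + g') ((i, j) :: rest)]
                have e2 : 1 + g' = g' + 1 := by omega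
                rw [e2, loopB_pop s t memo₂ i j v hval₂]
              | none =>
                have hA₂ : valB t.length s.length memo₂ i (j + 1)
                    = some (gB s t i (j + 1)) :=
                  valB_mono s t memo₁ memo₂ hsub₂ i (j + 1) _ hres₁
                obtain ⟨memo', hv', hsub', hres', hcont'⟩ :=
                  finishB_t s t memo₂ i j hv₂ h1 hjlt hval₂ hA₂ hc hres₂
                refine ⟨1 + f₁ + 1 + f₂ + 1, by omega, memo', hv',
                  (fun p v h => hsub' p v (hsub₂ p v (hsub₁ p v h))), hres', fun g' rest => ?_⟩
                have e1 : 1 + f₁ + 1 + f₂ + 1 + g' = (f₁ + ((f₂ + (g' + 1)) + 1)) + 1 := by omega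
                rw [e1, loopB_push1 s t memo i j hval hA0,
                  hcont₁ ((f₂ + (g' + 1)) + 1) ((i, j) :: rest),
                  loopB_push2 s t memo₁ i j _ hval₁ hres₁ hc hB₁,
                  hcont₂ (g' + 1) ((i, j) :: rest), hcont' g' rest]
          · have hcf : (s.getD j ' ' == t.getD i ' ') = false := by simpa using hc
            obtain ⟨memo', hv', hsub', hres', hcont'⟩ :=
              finishB_f s t memo₁ i j hv₁ h1 hjlt hval₁ hres₁ hcf
            refine ⟨1 + f₁ + 1, by omega, memo', hv',
              (fun p v h => hsub' p v (hsub₁ p v h)), hres', fun g' rest => ?_⟩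
            have e1 : 1 + f₁ + 1 + g' = (f₁ + (g' + 1)) + 1 := by omega
            rw [e1, loopB_push1 s t memo i j hval hA0,
              hcont₁ (g' + 1) ((i, j) :: rest), hcont' g' rest]

-- B's machine computes gB at the goal cell
theorem altB_eq_gB (string sub_str : String) :
    subseq_in_str_alt string sub_str = gB string.toList sub_str.toList 0 0 := by
  have hve : ValidB string.toList sub_str.toList PySem.Dict.empty := by
    intro i j v h
    rw [PySem.Dict.get?_empty] at h
    cases h
  obtain ⟨f, hf, memo', hv', hsub', hres', hcont'⟩ :=
    resolveB string.toList sub_str.toList string.toList.length 0 0 (by omega) (by omega)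
      (by omega) PySem.Dict.empty hve
  have hfe : 4 ^ (string.toList.length + 1) = f + (4 ^ (string.toList.length + 1) - f) := by
    omega
  simp only [subseq_in_str_alt]
  rw [hfe, hcont' _ []]
  have hnil : loopB string.toList sub_str.toList (4 ^ (string.toList.length + 1) - f) [] memo'
      = some memo' := by
    simp [loopB]
  rw [hnil]
  show (valB sub_str.toList.length string.toList.length memo' 0 0).getD 0
    = gB string.toList sub_str.toList 0 0
  rw [hres']
  rfl

-- ===== VERDICT (by name: the statement is the Claim_ definition above) =====
theorem subseq_in_str_spec : Claim_equal_subseq_in_str := by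
  intro string sub_str _
  unfold Spec_subseq_in_str
  rw [altB_eq_gB]
  have hA : subseq_in_str string sub_str =
      Fgrid string.toList sub_str.toList sub_str.toList.length string.toList.length := by
    simp only [subseq_in_str]
    rw [foldA_spec string.toList sub_str.toList sub_str.toList 0 _ rfl (by simp)
      (by
        intro k hk
        have h0 : Fgrid string.toList sub_str.toList 0 k = 1 := by rw [Fgrid]
        rw [h0]
        rw [List.getD_eq_getElem?_getD, List.getElem?_replicate]
        rw [if_pos (by simpa using Nat.lt_succ_of_le hk)]
        rfl)]
    simp
  rw [hA,
    Fgrid_eq_numSub string.toList sub_str.toList string.toList.length (le_refl _)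
      sub_str.toList.length (le_refl _),
    gB_eq_numSub string.toList sub_str.toList string.toList.length 0 (by omega) (by omega) 0
      (by omega)]
  rw [List.take_length, List.take_length, List.drop_zero, List.drop_zero]
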